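-- pv_equiv track=rewrite | github.com/Sasha-OS/PAIS | lab3/Algorytms.py | chooseSmall
-- ===== SOURCE A (Python) =====
-- def chooseSmall(matrix):
--     value = 1000
--     currentVay = []
--     for i in range(0, len(matrix)):
--         for j in range(0, len(matrix[i])):
--             if not matrix[i][j] == -1 and matrix[i][j] > 0:
--                 if matrix[i][j] < value:
--                     value = matrix[i][j]
--                     currentVay = [i, j]
--     return currentVay
-- ===== SOURCE B (Python) =====
-- def chooseSmall(matrix):
--     cells = [(i, j, v) for i, row in enumerate(matrix) for j, v in enumerate(row) if 0 < v < 1000]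
--     if not cells:
--         return []
--     m = min(v for _, _, v in cells)
--     i, j, _ = next(c for c in cells if c[2] == m)
--     return [i, j]
-- ===== Notes on version B (the rewrite author's own statement) =====
-- stated objective: alternative
-- what changed: Replaces the running-minimum accumulator over index loops by a collect-then-select decomposition: one comprehension over enumerate builds the (i,j,v) candidates with 0<v<1000, then min() over the values and next() over the candidates pick the answer.
import Mathlib
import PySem

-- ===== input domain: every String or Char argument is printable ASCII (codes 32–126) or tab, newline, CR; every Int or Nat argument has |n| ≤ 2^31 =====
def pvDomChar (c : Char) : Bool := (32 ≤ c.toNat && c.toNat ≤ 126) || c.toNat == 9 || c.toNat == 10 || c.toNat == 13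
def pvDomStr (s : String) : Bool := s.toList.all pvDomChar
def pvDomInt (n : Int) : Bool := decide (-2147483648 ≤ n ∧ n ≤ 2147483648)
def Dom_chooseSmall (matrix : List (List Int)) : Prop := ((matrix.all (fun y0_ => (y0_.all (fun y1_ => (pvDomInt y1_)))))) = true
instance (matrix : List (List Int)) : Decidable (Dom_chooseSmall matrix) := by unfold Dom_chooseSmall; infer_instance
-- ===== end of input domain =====

-- B replaces A's running-minimum accumulator loops by collect-candidates / min / first-match selection (alternative decomposition, same cost).

-- ===== PORT A =====
def chooseSmall (matrix : List (List Int)) : List Int :=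
  -- value = 1000; currentVay = []; nested index loops with a running strict minimum
  (((PySem.List.pyRange 0 (PySem.List.len matrix) 1).foldl
    (fun (st : Int × List Int) i =>
      (PySem.List.pyRange 0 (PySem.List.len (PySem.List.pyGetD matrix i [])) 1).foldl
        (fun (st : Int × List Int) j =>
          let x := PySem.List.pyGetD (PySem.List.pyGetD matrix i []) j 0
          if (!(x == -1)) && decide (x > 0) then
            if x < st.1 then (x, [i, j]) else st
          else st) st)
    ((1000 : Int), ([] : List Int))) : Int × List Int).2

-- ===== PORT B =====
def chooseSmall_alt (matrix : List (List Int)) : List Int :=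
  let cells := (PySem.List.enumerate matrix).flatMap
    (fun p => (PySem.List.enumerate p.2).filterMap
      (fun q => if 0 < q.2 ∧ q.2 < 1000 then some (p.1, q.1, q.2) else none))
  match PySem.List.min? (cells.map (fun c => c.2.2)) (fun v => v) with
  | none => []     -- 'if not cells: return []'  (min? = none iff cells = [])
  | some m =>
    match cells.find? (fun c => c.2.2 == m) with
    | some c => [c.1, c.2.1]
    | none => []   -- unreachable (m is the value of some candidate); Python's next() never falls through here

-- ===== PRECONDITION & SPEC =====
def Spec_chooseSmall (matrix : List (List Int)) (out : List Int) : Prop := out = chooseSmall_alt matrix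
instance (matrix : List (List Int)) (out : List Int) : Decidable (Spec_chooseSmall matrix out) := by unfold Spec_chooseSmall; infer_instance

-- ===== CLAIM (what is proved, stated in full; the proofs are below) =====
def Claim_equal_chooseSmall : Prop := ∀ (matrix : List (List Int)), Dom_chooseSmall matrix → Spec_chooseSmall matrix (chooseSmall matrix)

-- ===== LEMMAS AND PROOFS =====

-- the row-major cell list (i, j, v) of ALL entries
def pvCellsAll (matrix : List (List Int)) : List (Int × Int × Int) :=
  (PySem.List.enumerate matrix).flatMap
    (fun p => (PySem.List.enumerate p.2).map (fun q => (p.1, q.1, q.2)))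

-- A's loop body, on a cell, with the full Python guard
def pvStepFull (st : Int × List Int) (c : Int × Int × Int) : Int × List Int :=
  if (!(c.2.2 == -1)) && decide (c.2.2 > 0) then
    if c.2.2 < st.1 then (c.2.2, [c.1, c.2.1]) else st
  else st

-- the simplified step on pre-filtered cells
def pvStep (st : Int × List Int) (c : Int × Int × Int) : Int × List Int :=
  if c.2.2 < st.1 then (c.2.2, [c.1, c.2.1]) else st

def pvPred (c : Int × Int × Int) : Bool := decide (0 < c.2.2 ∧ c.2.2 < 1000)

def pvMinv (L : List (Int × Int × Int)) (val : Int) : Int :=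
  L.foldl (fun a c => min a c.2.2) val

lemma foldl_flatMap' {α β γ : Type} (l : List α) (g : α → List β) (f : γ → β → γ) (init : γ) :
    (l.flatMap g).foldl f init = l.foldl (fun acc x => (g x).foldl f acc) init := by
  induction l generalizing init with
  | nil => rfl
  | cons a l ih => simp [List.flatMap_cons, List.foldl_append, ih]

lemma filter_flatMap' {α β : Type} (l : List α) (g : α → List β) (p : β → Bool) :
    (l.flatMap g).filter p = l.flatMap (fun x => (g x).filter p) := by
  induction l with
  | nil => rfl
  | cons a l ih => simp [List.flatMap_cons, List.filter_append, ih]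

lemma chooseSmall_eq_fold (matrix : List (List Int)) :
    chooseSmall matrix = ((pvCellsAll matrix).foldl pvStepFull (1000, [])).2 := by
  unfold pvCellsAll
  rw [foldl_flatMap', PySem.List.enumerate_eq_map_pyRange matrix ([] : List Int), List.foldl_map]
  unfold chooseSmall
  congr 2
  funext st i
  rw [List.foldl_map, PySem.List.enumerate_eq_map_pyRange (PySem.List.pyGetD matrix i []) (0 : Int),
    List.foldl_map]
  rfl

lemma foldFull_eq_filter (L : List (Int × Int × Int)) :
    ∀ (val : Int) (cur : List Int), val ≤ 1000 →
      L.foldl pvStepFull (val, cur) = (L.filter pvPred).foldl pvStep (val, cur) := by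
  induction L with
  | nil => intro val cur h; rfl
  | cons c L ih =>
    intro val cur h
    rw [List.foldl_cons]
    by_cases hp : 0 < c.2.2 ∧ c.2.2 < 1000
    · obtain ⟨hp1, hp2⟩ := hp
      have hf : (c :: L).filter pvPred = c :: L.filter pvPred := by
        simp [pvPred, hp1, hp2]
      rw [hf, List.foldl_cons]
      have hguard : pvStepFull (val, cur) c = pvStep (val, cur) c := by
        simp [pvStepFull, pvStep, show ¬(c.2.2 = -1) by omega, hp1]
      rw [hguard]
      by_cases hlt : c.2.2 < val
      · have hst : pvStep (val, cur) c = (c.2.2, [c.1, c.2.1]) := by simp [pvStep, hlt]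
        rw [hst]
        exact ih _ _ (by omega)
      · have hst : pvStep (val, cur) c = (val, cur) := by simp [pvStep, hlt]
        rw [hst]
        exact ih _ _ h
    · have hf : (c :: L).filter pvPred = L.filter pvPred := by
        simp [pvPred, hp]
      rw [hf]
      have hfull : pvStepFull (val, cur) c = (val, cur) := by
        by_cases h0 : 0 < c.2.2
        · have hge : ¬ c.2.2 < val := by omega
          simp [pvStepFull, hge]
        · simp [pvStepFull, h0]
      rw [hfull]
      exact ih _ _ h

lemma pvMinv_le (L : List (Int × Int × Int)) (val : Int) : pvMinv L val ≤ val := by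
  have := (PySem.List.foldl_min_le (L.map (fun c => c.2.2)) val).1
  simpa [pvMinv, List.foldl_map] using this

lemma pvMinv_attained (L : List (Int × Int × Int)) (val : Int) (h : pvMinv L val < val) :
    ∃ c ∈ L, c.2.2 = pvMinv L val := by
  have heq : pvMinv L val = List.foldl min val (L.map (fun c => c.2.2)) := by
    simp [pvMinv, List.foldl_map]
  have := PySem.List.foldl_min_mem (L.map (fun c => c.2.2)) val
  rw [← heq] at this
  rcases this with h' | h'
  · exact absurd h (by simp [h'])
  · rw [heq] at h' ⊢
    rcases List.mem_map.mp h' with ⟨c, hc, hv⟩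
    exact ⟨c, hc, hv⟩

lemma best_spec (L : List (Int × Int × Int)) :
    ∀ (val : Int) (cur : List Int),
      L.foldl pvStep (val, cur) =
        (pvMinv L val,
         if pvMinv L val < val then
           (match L.find? (fun c => c.2.2 == pvMinv L val) with
            | some c => [c.1, c.2.1]
            | none => cur)
         else cur) := by
  induction L with
  | nil => intro val cur; simp [pvMinv]
  | cons c L ih =>
    intro val cur
    have hmv : pvMinv (c :: L) val = pvMinv L (min val c.2.2) := rfl
    by_cases hv : c.2.2 < val
    · have hmin : min val c.2.2 = c.2.2 := min_eq_right hv.le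
      rw [List.foldl_cons]
      have hstep : pvStep (val, cur) c = (c.2.2, [c.1, c.2.1]) := by
        simp [pvStep, hv]
      rw [hstep, ih c.2.2 [c.1, c.2.1], hmv, hmin]
      have hle : pvMinv L c.2.2 ≤ c.2.2 := pvMinv_le L c.2.2
      have hlt : pvMinv L c.2.2 < val := lt_of_le_of_lt hle hv
      rw [if_pos hlt]
      by_cases heq : c.2.2 = pvMinv L c.2.2
      · have hfind : (c :: L).find? (fun d => d.2.2 == pvMinv L c.2.2) = some c :=
          List.find?_cons_of_pos (h := by simpa using heq)
        rw [hfind, if_neg (by omega)]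
      · have hlt' : pvMinv L c.2.2 < c.2.2 := lt_of_le_of_ne hle (fun h => heq h.symm)
        rw [if_pos hlt']
        have hfind : (c :: L).find? (fun d => d.2.2 == pvMinv L c.2.2)
            = L.find? (fun d => d.2.2 == pvMinv L c.2.2) :=
          List.find?_cons_of_neg (h := by simpa using heq)
        rw [hfind]
        rcases pvMinv_attained L c.2.2 hlt' with ⟨d, hd, hdv⟩
        have hsome : (L.find? (fun d => d.2.2 == pvMinv L c.2.2)).isSome := by
          rw [List.find?_isSome]
          exact ⟨d, hd, by simp [hdv]⟩
        rcases Option.isSome_iff_exists.mp hsome with ⟨d', hd'⟩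
        rw [hd']
    · have hmin : min val c.2.2 = val := min_eq_left (le_of_not_gt hv)
      rw [List.foldl_cons]
      have hstep : pvStep (val, cur) c = (val, cur) := by
        simp [pvStep, hv]
      rw [hstep, ih val cur, hmv, hmin]
      by_cases hlt : pvMinv L val < val
      · rw [if_pos hlt, if_pos hlt]
        have hne : ¬ (c.2.2 = pvMinv L val) := by
          intro h; exact hv (h ▸ lt_of_lt_of_le hlt (le_refl val)) |>.elim
        have hfind : (c :: L).find? (fun d => d.2.2 == pvMinv L val)
            = L.find? (fun d => d.2.2 == pvMinv L val) :=
          List.find?_cons_of_neg (h := by simpa using hne)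
        rw [hfind]
      · rw [if_neg hlt, if_neg hlt]

lemma filterMap_row (i : Int) (l : List (Int × Int)) :
    l.filterMap (fun q => if 0 < q.2 ∧ q.2 < 1000 then some (i, q.1, q.2) else none)
      = (l.map (fun q => (i, q.1, q.2))).filter pvPred := by
  induction l with
  | nil => rfl
  | cons q l ih =>
    by_cases h : 0 < q.2 ∧ q.2 < 1000
    · simp [pvPred, h.1, h.2, ih]
    · simp only [List.filterMap_cons, List.map_cons, List.filter_cons]
      rw [if_neg (by simpa using h), if_neg (by simpa [pvPred] using h), ih]

lemma cells_eq_filter (matrix : List (List Int)) :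
    (PySem.List.enumerate matrix).flatMap
      (fun p => (PySem.List.enumerate p.2).filterMap
        (fun q => if 0 < q.2 ∧ q.2 < 1000 then some (p.1, q.1, q.2) else none))
      = (pvCellsAll matrix).filter pvPred := by
  unfold pvCellsAll
  rw [filter_flatMap']
  simp only [filterMap_row]

-- ===== VERDICT (by name: the statement is the Claim_ definition above) =====
lemma alt_eq_best (L : List (Int × Int × Int)) (hL : ∀ d ∈ L, 0 < d.2.2 ∧ d.2.2 < 1000) :
    (match PySem.List.min? (L.map (fun c => c.2.2)) (fun v => v) with
     | none => ([] : List Int)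
     | some m =>
       match L.find? (fun c => c.2.2 == m) with
       | some c => [c.1, c.2.1]
       | none => [])
      = (L.foldl pvStep (1000, [])).2 := by
  rw [best_spec]
  cases L with
  | nil => simp [pvMinv, PySem.List.min?]
  | cons c t =>
    have hc := hL c (List.mem_cons_self)
    rw [List.map_cons, PySem.List.min?_id_cons]
    have hmA : pvMinv (c :: t) 1000 = (t.map (fun d => d.2.2)).foldl min c.2.2 := by
      show pvMinv t (min 1000 c.2.2) = _
      rw [min_eq_right (by omega : c.2.2 ≤ 1000)]
      simp [pvMinv, List.foldl_map]
    have hle : pvMinv t c.2.2 ≤ c.2.2 := pvMinv_le t c.2.2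
    have hlt : pvMinv (c :: t) 1000 < 1000 := by
      have h1 : pvMinv (c :: t) 1000 = pvMinv t c.2.2 := by
        show pvMinv t (min 1000 c.2.2) = _
        rw [min_eq_right (by omega : c.2.2 ≤ 1000)]
      omega
    rw [if_pos hlt, ← hmA]

lemma alt_eq (matrix : List (List Int)) :
    chooseSmall_alt matrix = (((pvCellsAll matrix).filter pvPred).foldl pvStep (1000, [])).2 := by
  unfold chooseSmall_alt
  simp only [cells_eq_filter]
  exact alt_eq_best _ (fun d hd => by
    have := List.of_mem_filter hd
    simpa [pvPred] using this)

theorem chooseSmall_spec : Claim_equal_chooseSmall := by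
  intro matrix _
  show chooseSmall matrix = chooseSmall_alt matrix
  rw [chooseSmall_eq_fold, foldFull_eq_filter (pvCellsAll matrix) 1000 [] le_rfl, alt_eq]
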